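-- pv_equiv track=rewrite | github.com/KolodziejczykR/BaseballPath | backend/school_filtering/filters/demographic_filter.py | _meets_party_scene_preference
-- ===== SOURCE A (Python) =====
-- from typing import List, Dict, Any, Union
--
-- def _meets_party_scene_preference(school: Dict[str, Any], party_preference: List[str]) -> bool:
--     """
--     Check if school party scene matches preference
--
--     Args:
--         school: School data
--         party_preference: List of preferences like ["Active", "Moderate"] or ["Quiet"]
--
--     Returns:
--         True if school matches any of the party scene preferences
--     """
--     party_grade = school.get('party_scene_grade', '')
--     if not party_grade:
--         return True  # If no grade, don't exclude
--
--     # Define grade ranges for each preference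
--     grade_ranges = {
--         "Active": ['A+', 'A'],
--         "Moderate": ['A-', 'B+', 'B'],
--         "Quiet": ['B-', 'C+', 'C', 'C-', 'D+', 'D', 'D-', 'F']
--     }
--
--     # Check if school's grade matches any of the preferred categories
--     for preference in party_preference:
--         if preference in grade_ranges and party_grade in grade_ranges[preference]:
--             return True
--
--     return False
-- ===== SOURCE B (Python) =====
-- # B: invert the grade tables once into a flat grade->category dict; one lookup
-- # plus one membership test replaces A's loop over preferences.
-- GRADE_TO_CATEGORY = {
--     'A+': 'Active', 'A': 'Active',
--     'A-': 'Moderate', 'B+': 'Moderate', 'B': 'Moderate',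
--     'B-': 'Quiet', 'C+': 'Quiet', 'C': 'Quiet', 'C-': 'Quiet',
--     'D+': 'Quiet', 'D': 'Quiet', 'D-': 'Quiet', 'F': 'Quiet',
-- }
--
-- def _meets_party_scene_preference(school, party_preference):
--     party_grade = school.get('party_scene_grade', '')
--     if not party_grade:
--         return True  # If no grade, don't exclude
--     category = GRADE_TO_CATEGORY.get(party_grade)
--     return category is not None and category in party_preference
-- ===== Notes on version B (the rewrite author's own statement) =====
-- stated objective: idiomatic
-- what changed: B inverts the per-category grade tables into one flat grade-to-category dict built once, so the loop over preferences disappears: a single dict lookup of the grade followed by one membership test of the resulting category in the preference list.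
import Mathlib
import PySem

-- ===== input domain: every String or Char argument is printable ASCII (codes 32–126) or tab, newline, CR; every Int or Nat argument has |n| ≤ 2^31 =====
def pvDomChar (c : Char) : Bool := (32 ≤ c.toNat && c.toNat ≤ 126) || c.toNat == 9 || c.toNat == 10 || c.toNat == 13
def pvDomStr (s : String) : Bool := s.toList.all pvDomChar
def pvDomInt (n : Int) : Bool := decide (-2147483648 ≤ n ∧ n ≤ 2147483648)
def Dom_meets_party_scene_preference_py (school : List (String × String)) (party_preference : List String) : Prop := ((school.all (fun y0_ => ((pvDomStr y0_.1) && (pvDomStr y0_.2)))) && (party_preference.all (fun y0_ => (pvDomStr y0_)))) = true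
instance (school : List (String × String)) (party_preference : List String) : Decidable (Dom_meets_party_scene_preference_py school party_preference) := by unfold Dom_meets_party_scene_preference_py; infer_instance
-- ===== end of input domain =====

-- B replaces A's loop over preferences by one lookup in a prebuilt grade-to-category dict plus one membership test (idiomatic; same cost).
-- ===== PORT A =====
def gradeRangesA : PySem.Dict String (List String) :=
  PySem.Dict.ofList [("Active", ["A+", "A"]),
                     ("Moderate", ["A-", "B+", "B"]),
                     ("Quiet", ["B-", "C+", "C", "C-", "D+", "D", "D-", "F"])]

def aPrefLoop (party_grade : String) : List String → Bool
  | [] => false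
  | preference :: rest =>
      if gradeRangesA.contains preference && (gradeRangesA.getD preference []).contains party_grade then
        true
      else aPrefLoop party_grade rest

def meets_party_scene_preference_py (school : List (String × String)) (party_preference : List String) : Bool :=
  let party_grade := (PySem.Dict.ofList school).getD "party_scene_grade" ""
  if party_grade == "" then true
  else aPrefLoop party_grade party_preference

-- ===== PORT B =====
def gradeToCategoryB : PySem.Dict String String :=
  PySem.Dict.ofList [("A+", "Active"), ("A", "Active"),
                     ("A-", "Moderate"), ("B+", "Moderate"), ("B", "Moderate"),
                     ("B-", "Quiet"), ("C+", "Quiet"), ("C", "Quiet"), ("C-", "Quiet"),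
                     ("D+", "Quiet"), ("D", "Quiet"), ("D-", "Quiet"), ("F", "Quiet")]

def meets_party_scene_preference_py_alt (school : List (String × String)) (party_preference : List String) : Bool :=
  let party_grade := (PySem.Dict.ofList school).getD "party_scene_grade" ""
  if party_grade == "" then true
  else
    match gradeToCategoryB.get? party_grade with
    | none => false
    | some category => party_preference.contains category

-- ===== PRECONDITION & SPEC =====
def Spec_meets_party_scene_preference_py (school : List (String × String)) (party_preference : List String) (out : Bool) : Prop := out = meets_party_scene_preference_py_alt school party_preference
instance (school : List (String × String)) (party_preference : List String) (out : Bool) : Decidable (Spec_meets_party_scene_preference_py school party_preference out) := by unfold Spec_meets_party_scene_preference_py; infer_instance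

-- ===== CLAIM (what is proved, stated in full; the proofs are below) =====
def Claim_equal_meets_party_scene_preference_py : Prop := ∀ (school : List (String × String)) (party_preference : List String), Dom_meets_party_scene_preference_py school party_preference → Spec_meets_party_scene_preference_py school party_preference (meets_party_scene_preference_py school party_preference)

-- ===== LEMMAS AND PROOFS =====
-- normal form of "preference p accepts grade g", used to bridge the two ports
def prefAccepts (p g : String) : Bool :=
  (p == "Active" && ["A+", "A"].contains g) ||
  (p == "Moderate" && ["A-", "B+", "B"].contains g) ||
  (p == "Quiet" && ["B-", "C+", "C", "C-", "D+", "D", "D-", "F"].contains g)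

lemma a_cond_eq (p g : String) :
    (gradeRangesA.contains p && (gradeRangesA.getD p []).contains g) = prefAccepts p g := by
  by_cases hActive : p = "Active"
  · subst hActive
    rw [show gradeRangesA.contains "Active" = true from by decide,
        show gradeRangesA.getD "Active" [] = ["A+", "A"] from by decide]
    simp [prefAccepts]
  by_cases hModerate : p = "Moderate"
  · subst hModerate
    rw [show gradeRangesA.contains "Moderate" = true from by decide,
        show gradeRangesA.getD "Moderate" [] = ["A-", "B+", "B"] from by decide]
    simp [prefAccepts]
  by_cases hQuiet : p = "Quiet"
  · subst hQuiet
    rw [show gradeRangesA.contains "Quiet" = true from by decide,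
        show gradeRangesA.getD "Quiet" [] = ["B-", "C+", "C", "C-", "D+", "D", "D-", "F"] from by decide]
    simp [prefAccepts]
  · rw [show gradeRangesA = PySem.Dict.mk [("Active", ["A+", "A"]), ("Moderate", ["A-", "B+", "B"]), ("Quiet", ["B-", "C+", "C", "C-", "D+", "D", "D-", "F"])] from by decide]
    have e1 : (("Active" : String) == p) = false := by simpa using Ne.symm hActive
    have e2 : (("Moderate" : String) == p) = false := by simpa using Ne.symm hModerate
    have e3 : (("Quiet" : String) == p) = false := by simpa using Ne.symm hQuiet
    have f1 : (p == ("Active" : String)) = false := by simpa using hActive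
    have f2 : (p == ("Moderate" : String)) = false := by simpa using hModerate
    have f3 : (p == ("Quiet" : String)) = false := by simpa using hQuiet
    simp [prefAccepts, PySem.Dict.contains_mk, e1, e2, e3, f1, f2, f3]

lemma b_cond_eq (p g : String) :
    (gradeToCategoryB.get? g).any (fun c => c == p) = prefAccepts p g := by
  by_cases hAp : g = "A+"
  · subst hAp
    rw [show gradeToCategoryB.get? "A+" = some "Active" from by decide]
    simp only [prefAccepts, show (["A+", "A"].contains "A+") = true from by decide, show (["A-", "B+", "B"].contains "A+") = false from by decide, show (["B-", "C+", "C", "C-", "D+", "D", "D-", "F"].contains "A+") = false from by decide]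
    simp [eq_comm]
  by_cases hA : g = "A"
  · subst hA
    rw [show gradeToCategoryB.get? "A" = some "Active" from by decide]
    simp only [prefAccepts, show (["A+", "A"].contains "A") = true from by decide, show (["A-", "B+", "B"].contains "A") = false from by decide, show (["B-", "C+", "C", "C-", "D+", "D", "D-", "F"].contains "A") = false from by decide]
    simp [eq_comm]
  by_cases hAm : g = "A-"
  · subst hAm
    rw [show gradeToCategoryB.get? "A-" = some "Moderate" from by decide]
    simp only [prefAccepts, show (["A+", "A"].contains "A-") = false from by decide, show (["A-", "B+", "B"].contains "A-") = true from by decide, show (["B-", "C+", "C", "C-", "D+", "D", "D-", "F"].contains "A-") = false from by decide]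
    simp [eq_comm]
  by_cases hBp : g = "B+"
  · subst hBp
    rw [show gradeToCategoryB.get? "B+" = some "Moderate" from by decide]
    simp only [prefAccepts, show (["A+", "A"].contains "B+") = false from by decide, show (["A-", "B+", "B"].contains "B+") = true from by decide, show (["B-", "C+", "C", "C-", "D+", "D", "D-", "F"].contains "B+") = false from by decide]
    simp [eq_comm]
  by_cases hB : g = "B"
  · subst hB
    rw [show gradeToCategoryB.get? "B" = some "Moderate" from by decide]
    simp only [prefAccepts, show (["A+", "A"].contains "B") = false from by decide, show (["A-", "B+", "B"].contains "B") = true from by decide, show (["B-", "C+", "C", "C-", "D+", "D", "D-", "F"].contains "B") = false from by decide]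
    simp [eq_comm]
  by_cases hBm : g = "B-"
  · subst hBm
    rw [show gradeToCategoryB.get? "B-" = some "Quiet" from by decide]
    simp only [prefAccepts, show (["A+", "A"].contains "B-") = false from by decide, show (["A-", "B+", "B"].contains "B-") = false from by decide, show (["B-", "C+", "C", "C-", "D+", "D", "D-", "F"].contains "B-") = true from by decide]
    simp [eq_comm]
  by_cases hCp : g = "C+"
  · subst hCp
    rw [show gradeToCategoryB.get? "C+" = some "Quiet" from by decide]
    simp only [prefAccepts, show (["A+", "A"].contains "C+") = false from by decide, show (["A-", "B+", "B"].contains "C+") = false from by decide, show (["B-", "C+", "C", "C-", "D+", "D", "D-", "F"].contains "C+") = true from by decide]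
    simp [eq_comm]
  by_cases hC : g = "C"
  · subst hC
    rw [show gradeToCategoryB.get? "C" = some "Quiet" from by decide]
    simp only [prefAccepts, show (["A+", "A"].contains "C") = false from by decide, show (["A-", "B+", "B"].contains "C") = false from by decide, show (["B-", "C+", "C", "C-", "D+", "D", "D-", "F"].contains "C") = true from by decide]
    simp [eq_comm]
  by_cases hCm : g = "C-"
  · subst hCm
    rw [show gradeToCategoryB.get? "C-" = some "Quiet" from by decide]
    simp only [prefAccepts, show (["A+", "A"].contains "C-") = false from by decide, show (["A-", "B+", "B"].contains "C-") = false from by decide, show (["B-", "C+", "C", "C-", "D+", "D", "D-", "F"].contains "C-") = true from by decide]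
    simp [eq_comm]
  by_cases hDp : g = "D+"
  · subst hDp
    rw [show gradeToCategoryB.get? "D+" = some "Quiet" from by decide]
    simp only [prefAccepts, show (["A+", "A"].contains "D+") = false from by decide, show (["A-", "B+", "B"].contains "D+") = false from by decide, show (["B-", "C+", "C", "C-", "D+", "D", "D-", "F"].contains "D+") = true from by decide]
    simp [eq_comm]
  by_cases hD : g = "D"
  · subst hD
    rw [show gradeToCategoryB.get? "D" = some "Quiet" from by decide]
    simp only [prefAccepts, show (["A+", "A"].contains "D") = false from by decide, show (["A-", "B+", "B"].contains "D") = false from by decide, show (["B-", "C+", "C", "C-", "D+", "D", "D-", "F"].contains "D") = true from by decide]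
    simp [eq_comm]
  by_cases hDm : g = "D-"
  · subst hDm
    rw [show gradeToCategoryB.get? "D-" = some "Quiet" from by decide]
    simp only [prefAccepts, show (["A+", "A"].contains "D-") = false from by decide, show (["A-", "B+", "B"].contains "D-") = false from by decide, show (["B-", "C+", "C", "C-", "D+", "D", "D-", "F"].contains "D-") = true from by decide]
    simp [eq_comm]
  by_cases hF : g = "F"
  · subst hF
    rw [show gradeToCategoryB.get? "F" = some "Quiet" from by decide]
    simp only [prefAccepts, show (["A+", "A"].contains "F") = false from by decide, show (["A-", "B+", "B"].contains "F") = false from by decide, show (["B-", "C+", "C", "C-", "D+", "D", "D-", "F"].contains "F") = true from by decide]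
    simp [eq_comm]
  · have h0 : ∀ x : String, (PySem.Dict.mk ([] : List (String × String))).get? x = none := fun _ => rfl
    rw [show gradeToCategoryB = PySem.Dict.mk [("A+", "Active"), ("A", "Active"), ("A-", "Moderate"), ("B+", "Moderate"), ("B", "Moderate"), ("B-", "Quiet"), ("C+", "Quiet"), ("C", "Quiet"), ("C-", "Quiet"), ("D+", "Quiet"), ("D", "Quiet"), ("D-", "Quiet"), ("F", "Quiet")] from by decide]
    simp [prefAccepts, PySem.Dict.get?_mk_cons, h0, beq_iff_eq, hAp, hA, hAm, hBp, hB, hBm, hCp, hC, hCm, hDp, hD, hDm, hF, Ne.symm hAp, Ne.symm hA, Ne.symm hAm, Ne.symm hBp, Ne.symm hB, Ne.symm hBm, Ne.symm hCp, Ne.symm hC, Ne.symm hCm, Ne.symm hDp, Ne.symm hD, Ne.symm hDm, Ne.symm hF]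

lemma aPrefLoop_eq (g : String) (prefs : List String) :
    aPrefLoop g prefs =
      (match gradeToCategoryB.get? g with
       | none => false
       | some category => prefs.contains category) := by
  induction prefs with
  | nil => cases hc : gradeToCategoryB.get? g <;> simp [aPrefLoop]
  | cons p rest ih =>
      have hcond : (gradeRangesA.contains p && (gradeRangesA.getD p []).contains g)
          = (gradeToCategoryB.get? g).any (fun c => c == p) := by
        rw [a_cond_eq, b_cond_eq]
      rw [aPrefLoop, hcond]
      cases hc : gradeToCategoryB.get? g with
      | none => simpa [hc] using ih
      | some c =>
          rw [hc] at ih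
          simp only [Option.any_some]
          by_cases hcp : c = p
          · subst hcp
            simp
          · have h1 : (c == p) = false := by simpa using hcp
            simp [h1, ih]
            exact fun h => absurd h hcp

-- ===== VERDICT (by name: the statement is the Claim_ definition above) =====
theorem meets_party_scene_preference_py_spec : Claim_equal_meets_party_scene_preference_py := by
  intro school party_preference _
  unfold Spec_meets_party_scene_preference_py
  unfold meets_party_scene_preference_py meets_party_scene_preference_py_alt
  by_cases hg : ((PySem.Dict.ofList school).getD "party_scene_grade" "" == "") = true
  · simp [hg]
  · simp only [Bool.not_eq_true] at hg
    simp only [hg]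
    rw [aPrefLoop_eq]
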